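-- pv_equiv track=rewrite | github.com/Hanalyx/OpenWatch | backend/app/services/engine/scanners/scap.py | _parse_profiles_output
-- ===== SOURCE A (Python) =====
-- from typing import Any, Dict, List, Optional, Tuple
--
-- def _parse_profiles_output(output: str) -> List[Dict[str, Any]]:
--     """Parse oscap info --profiles output."""
--     profiles: List[Dict[str, Any]] = []
--     lines = output.split("\n")
--
--     current_profile: Optional[Dict[str, Any]] = None
--
--     for line in lines:
--         line = line.strip()
--
--         if line.startswith("Profile ID:"):
--             if current_profile:
--                 profiles.append(current_profile)
--             current_profile = {
--                 "id": line.split(":", 1)[1].strip(),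
--                 "title": "",
--                 "description": "",
--             }
--         elif line.startswith("Title:") and current_profile:
--             current_profile["title"] = line.split(":", 1)[1].strip()
--         elif line.startswith("Description:") and current_profile:
--             current_profile["description"] = line.split(":", 1)[1].strip()
--
--     if current_profile:
--         profiles.append(current_profile)
--
--     return profiles
-- ===== SOURCE B (Python) =====
-- def _last_field(lines, prefix):
--     value = ""
--     for line in lines:
--         if line.startswith(prefix):
--             value = line.split(":", 1)[1].strip()
--     return value
--
--
-- def _parse_profiles_output(output):
--     """Parse oscap info --profiles output (group lines by header, then map each group)."""
--     groups = []
--     for line in output.split("\n"):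
--         line = line.strip()
--         if line.startswith("Profile ID:"):
--             groups.append([line])
--         elif groups:
--             groups[-1].append(line)
--     return [
--         {
--             "id": g[0].split(":", 1)[1].strip(),
--             "title": _last_field(g[1:], "Title:"),
--             "description": _last_field(g[1:], "Description:"),
--         }
--         for g in groups
--     ]
-- ===== Notes on version B (the rewrite author's own statement) =====
-- stated objective: alternative
-- what changed: Single stateful loop maintaining a mutable current-profile dict is replaced by a two-phase decomposition: first group stripped lines under each 'Profile ID:' header (discarding pre-header lines), then map every group to its dict, scanning the group body for the last 'Title:'/'Description:' match.
import Mathlib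
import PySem

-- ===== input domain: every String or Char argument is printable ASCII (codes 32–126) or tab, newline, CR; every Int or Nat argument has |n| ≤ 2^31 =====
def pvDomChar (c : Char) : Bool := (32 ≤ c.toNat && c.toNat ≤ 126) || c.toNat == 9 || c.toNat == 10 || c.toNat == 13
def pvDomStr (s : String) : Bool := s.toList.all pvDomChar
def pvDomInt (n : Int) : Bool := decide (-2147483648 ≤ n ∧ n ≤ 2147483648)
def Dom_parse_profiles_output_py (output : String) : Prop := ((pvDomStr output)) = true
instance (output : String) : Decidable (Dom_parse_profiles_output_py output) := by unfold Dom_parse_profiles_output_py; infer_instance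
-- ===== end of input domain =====

-- B replaces A's single stateful loop (a mutable current-profile dict) by a two-phase
-- decomposition: group stripped lines under each 'Profile ID:' header, then map every
-- group to its dict, scanning the group body for the last 'Title:'/'Description:' match.

-- ===== PORT A =====

-- line.split(":", 1)[1].strip() — every call site's line starts with a prefix containing ':',
-- so split(":", 1) has two pieces and the [1] index exists (the "" defaults are unreachable).
def pvAfterColon (s : String) : String :=
  PySem.Str.strip (((PySem.Str.splitMax? s ":" 1).getD []).getD 1 "")

-- the 'for line in lines' loop of A, state = (profiles, current_profile); the trailing
-- 'if current_profile: profiles.append(current_profile)' is the nil case.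
-- 'if current_profile:' (truthiness) is ported as .isSome: the dict, when present,
-- always has the three keys and is never empty.
def pvALoop : List String → List (PySem.Dict String String) → Option (PySem.Dict String String) →
    List (PySem.Dict String String)
  | [], profiles, cur =>
    match cur with
    | none => profiles
    | some c => profiles ++ [c]
  | l :: ls, profiles, cur =>
    let line := PySem.Str.strip l
    if PySem.Str.startswith line "Profile ID:" then
      pvALoop ls
        (match cur with
         | none => profiles
         | some c => profiles ++ [c])
        (some (PySem.Dict.mk [("id", pvAfterColon line), ("title", ""), ("description", "")]))
    else if PySem.Str.startswith line "Title:" && cur.isSome then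
      pvALoop ls profiles (cur.map (fun c => c.insert "title" (pvAfterColon line)))
    else if PySem.Str.startswith line "Description:" && cur.isSome then
      pvALoop ls profiles (cur.map (fun c => c.insert "description" (pvAfterColon line)))
    else
      pvALoop ls profiles cur

def parse_profiles_output_py (output : String) : List (List (String × String)) :=
  (pvALoop ((PySem.Str.split? output "\n").getD []) [] none).map (·.items)

-- ===== PORT B =====

-- grouping pass ('groups.append([line])' / 'groups[-1].append(line)'); the groups list and
-- each group are kept REVERSED so that the Python tail-appends become conses.
def pvBGroups : List String → List (List String) → List (List String)
  | [], groups => groups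
  | l :: ls, groups =>
    let line := PySem.Str.strip l
    if PySem.Str.startswith line "Profile ID:" then
      pvBGroups ls ([line] :: groups)
    else
      match groups with
      | [] => pvBGroups ls []
      | g :: rest => pvBGroups ls ((line :: g) :: rest)

-- _last_field(lines, prefix)
def pvLastField (lines : List String) (pre : String) : String :=
  lines.foldl (fun v line => if PySem.Str.startswith line pre then pvAfterColon line else v) ""

-- one group (in original order, header first) to its dict's items
def pvExtract (g : List String) : List (String × String) :=
  [("id", pvAfterColon (g.headD "")),
   ("title", pvLastField g.tail "Title:"),
   ("description", pvLastField g.tail "Description:")]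

def parse_profiles_output_py_alt (output : String) : List (List (String × String)) :=
  ((pvBGroups ((PySem.Str.split? output "\n").getD []) []).reverse).map (fun g => pvExtract g.reverse)

-- ===== PRECONDITION & SPEC =====
def Spec_parse_profiles_output_py (output : String) (out : List (List (String × String))) : Prop := out = parse_profiles_output_py_alt output
instance (output : String) (out : List (List (String × String))) : Decidable (Spec_parse_profiles_output_py output out) := by unfold Spec_parse_profiles_output_py; infer_instance

-- ===== CLAIM (what is proved, stated in full; the proofs are below) =====
def Claim_equal_parse_profiles_output_py : Prop := ∀ (output : String), Dom_parse_profiles_output_py output → Spec_parse_profiles_output_py output (parse_profiles_output_py output)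

-- ===== LEMMAS AND PROOFS =====

-- two distinct-first-letter prefixes cannot both be prefixes of one line
theorem pv_title_not_desc (s : String) :
    PySem.Str.startswith s "Title:" = true → PySem.Str.startswith s "Description:" = false := by
  simp only [PySem.Str.startswith_eq]
  intro h
  rw [← Bool.not_eq_true]
  intro hD
  rw [PySem.Chars.startswith_iff] at h hD
  obtain ⟨t1, e1⟩ := h
  obtain ⟨t2, e2⟩ := hD
  have h1 : s.toList.head? = some 'T' := by rw [← e1]; rfl
  have h2 : s.toList.head? = some 'D' := by rw [← e2]; rfl
  rw [h1] at h2; exact absurd (Option.some.inj h2) (by decide)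

theorem pvLastField_append_match (xs : List String) (s pre : String)
    (h : PySem.Str.startswith s pre = true) :
    pvLastField (xs ++ [s]) pre = pvAfterColon s := by
  simp only [pvLastField, List.foldl_append, List.foldl_cons, List.foldl_nil, h, if_true]

theorem pvLastField_append_nomatch (xs : List String) (s pre : String)
    (h : PySem.Str.startswith s pre = false) :
    pvLastField (xs ++ [s]) pre = pvLastField xs pre := by
  simp only [pvLastField, List.foldl_append, List.foldl_cons, List.foldl_nil, h, if_false,
    Bool.false_eq_true]

-- Python's in-place assignment to the 3-key dict, on items
theorem pv_insert_title (i t d v : String) :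
    (PySem.Dict.mk [("id", i), ("title", t), ("description", d)]).insert "title" v
      = PySem.Dict.mk [("id", i), ("title", v), ("description", d)] := by
  simp [PySem.Dict.insert, PySem.Dict.contains]

theorem pv_insert_desc (i t d v : String) :
    (PySem.Dict.mk [("id", i), ("title", t), ("description", d)]).insert "description" v
      = PySem.Dict.mk [("id", i), ("title", t), ("description", v)] := by
  simp [PySem.Dict.insert, PySem.Dict.contains]

theorem pvExtract_cons (h : String) (body : List String) :
    pvExtract (h :: body)
      = [("id", pvAfterColon h), ("title", pvLastField body "Title:"),
         ("description", pvLastField body "Description:")] := rfl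

-- the grouping loop touches only the head group and prepends new groups
theorem pvBGroups_cons (ls : List String) (g : List String) (gs : List (List String)) :
    pvBGroups ls (g :: gs) = pvBGroups ls [g] ++ gs := by
  induction ls generalizing g gs with
  | nil => simp [pvBGroups]
  | cons l ls ih =>
    by_cases hP : PySem.Str.startswith (PySem.Str.strip l) "Profile ID:" = true
    · simp only [pvBGroups, if_pos hP]
      rw [ih [PySem.Str.strip l] (g :: gs), ih [PySem.Str.strip l] [g]]
      simp
    · simp only [pvBGroups, if_neg hP]
      exact ih (PySem.Str.strip l :: g) gs

-- B's finisher of a reversed group list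
def pvFinish (gs : List (List String)) : List (List (String × String)) :=
  gs.reverse.map (fun g => pvExtract g.reverse)

theorem pvFinish_append (xs ys : List (List String)) :
    pvFinish (xs ++ ys) = pvFinish ys ++ pvFinish xs := by
  simp [pvFinish]

-- main invariant, running state: A's current dict is the extraction of B's (reversed) head group
theorem pv_loop_some (ls : List String) (ps : List (PySem.Dict String String))
    (g : List String) (hg : g ≠ []) :
    (pvALoop ls ps (some (PySem.Dict.mk (pvExtract g.reverse)))).map (·.items)
      = ps.map (·.items) ++ pvFinish (pvBGroups ls [g]) := by
  induction ls generalizing ps g with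
  | nil => simp [pvALoop, pvBGroups, pvFinish]
  | cons l ls ih =>
    obtain ⟨h, body, hrev⟩ : ∃ h body, g.reverse = h :: body := by
      rcases hx : g.reverse with _ | ⟨h, body⟩
      · exact absurd (by simpa using congrArg List.reverse hx) hg
      · exact ⟨h, body, rfl⟩
    simp only [pvALoop, pvBGroups]
    by_cases hP : PySem.Str.startswith (PySem.Str.strip l) "Profile ID:" = true
    · rw [if_pos hP, if_pos hP]
      have : (PySem.Dict.mk [("id", pvAfterColon (PySem.Str.strip l)), ("title", ""), ("description", "")])
          = PySem.Dict.mk (pvExtract ([PySem.Str.strip l].reverse)) := rfl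
      rw [this, ih _ [PySem.Str.strip l] (by simp), pvBGroups_cons ls [PySem.Str.strip l] [g],
        pvFinish_append]
      simp [pvFinish]
    · rw [if_neg hP, if_neg hP]
      have hsg : (PySem.Str.strip l :: g).reverse = h :: (body ++ [PySem.Str.strip l]) := by
        simp [hrev]
      by_cases hT : PySem.Str.startswith (PySem.Str.strip l) "Title:" = true
      · have hD := pv_title_not_desc _ hT
        rw [if_pos (by rw [hT]; rfl), Option.map_some]
        have : (PySem.Dict.mk (pvExtract g.reverse)).insert "title" (pvAfterColon (PySem.Str.strip l))
            = PySem.Dict.mk (pvExtract ((PySem.Str.strip l :: g).reverse)) := by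
          rw [hrev, hsg, pvExtract_cons, pvExtract_cons, pv_insert_title,
            pvLastField_append_match _ _ _ hT, pvLastField_append_nomatch _ _ _ hD]
        rw [this, ih _ _ (by simp)]
      · by_cases hD : PySem.Str.startswith (PySem.Str.strip l) "Description:" = true
        · rw [if_neg (by simp only [Bool.and_eq_true]; exact fun hc => hT hc.1),
          if_pos (by rw [hD]; rfl), Option.map_some]
          have : (PySem.Dict.mk (pvExtract g.reverse)).insert "description" (pvAfterColon (PySem.Str.strip l))
              = PySem.Dict.mk (pvExtract ((PySem.Str.strip l :: g).reverse)) := by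
            rw [hrev, hsg, pvExtract_cons, pvExtract_cons, pv_insert_desc,
              pvLastField_append_match _ _ _ hD,
              pvLastField_append_nomatch _ _ _ (Bool.not_eq_true _ ▸ hT : _ = false)]
          rw [this, ih _ _ (by simp)]
        · rw [if_neg (by simp only [Bool.and_eq_true]; exact fun hc => hT hc.1),
            if_neg (by simp only [Bool.and_eq_true]; exact fun hc => hD hc.1)]
          have : PySem.Dict.mk (pvExtract g.reverse)
              = PySem.Dict.mk (pvExtract ((PySem.Str.strip l :: g).reverse)) := by
            rw [hrev, hsg, pvExtract_cons, pvExtract_cons,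
              pvLastField_append_nomatch _ _ _ (Bool.not_eq_true _ ▸ hT : _ = false),
              pvLastField_append_nomatch _ _ _ (Bool.not_eq_true _ ▸ hD : _ = false)]
          rw [this, ih _ _ (by simp)]

-- before the first header: A drops lines, B has no group
theorem pv_loop_none (ls : List String) (ps : List (PySem.Dict String String)) :
    (pvALoop ls ps none).map (·.items) = ps.map (·.items) ++ pvFinish (pvBGroups ls []) := by
  induction ls generalizing ps with
  | nil => simp [pvALoop, pvBGroups, pvFinish]
  | cons l ls ih =>
    simp only [pvALoop, pvBGroups]
    by_cases hP : PySem.Str.startswith (PySem.Str.strip l) "Profile ID:" = true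
    · rw [if_pos hP, if_pos hP]
      have : (PySem.Dict.mk [("id", pvAfterColon (PySem.Str.strip l)), ("title", ""), ("description", "")])
          = PySem.Dict.mk (pvExtract ([PySem.Str.strip l].reverse)) := rfl
      rw [this, pv_loop_some ls ps [PySem.Str.strip l] (by simp)]
    · rw [if_neg hP, if_neg hP, if_neg (by simp), if_neg (by simp)]
      exact ih ps

-- ===== VERDICT (by name: the statement is the Claim_ definition above) =====
theorem parse_profiles_output_py_spec : Claim_equal_parse_profiles_output_py := by
  intro output _
  unfold Spec_parse_profiles_output_py parse_profiles_output_py parse_profiles_output_py_alt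
  rw [pv_loop_none]
  simp [pvFinish]
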